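-- pv_equiv track=rewrite | github.com/posl/comment_recommendation | script/split_gen/4_time/ja/250_B/8.py | paint_tile
-- ===== SOURCE A (Python) =====
-- def paint_tile(N, A, B):
--     tile = [["." for i in range(B*N)] for j in range(A*N)]
--     for i in range(A*N):
--         for j in range(B*N):
--             if i % 2 == 0 and j % 2 == 0:
--                 tile[i][j] = "#"
--             elif i % 2 == 1 and j % 2 == 1:
--                 tile[i][j] = "#"
--     return tile
-- ===== SOURCE B (Python) =====
-- def paint_tile(N, A, B):
--     height = A * N
--     if height <= 0:
--         return []
--     width = B * N
--     even_row = ["#" if j % 2 == 0 else "." for j in range(width)]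
--     odd_row = ["#" if j % 2 == 1 else "." for j in range(width)]
--     return [list(even_row) if i % 2 == 0 else list(odd_row) for i in range(height)]
-- ===== Notes on version B (the rewrite author's own statement) =====
-- stated objective: alternative
-- what changed: Replaces A's allocate-then-mutate nested per-cell loops with an empty-grid early return plus two precomputed parity template rows (even/odd) copied once per row in a single pass.
import Mathlib
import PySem

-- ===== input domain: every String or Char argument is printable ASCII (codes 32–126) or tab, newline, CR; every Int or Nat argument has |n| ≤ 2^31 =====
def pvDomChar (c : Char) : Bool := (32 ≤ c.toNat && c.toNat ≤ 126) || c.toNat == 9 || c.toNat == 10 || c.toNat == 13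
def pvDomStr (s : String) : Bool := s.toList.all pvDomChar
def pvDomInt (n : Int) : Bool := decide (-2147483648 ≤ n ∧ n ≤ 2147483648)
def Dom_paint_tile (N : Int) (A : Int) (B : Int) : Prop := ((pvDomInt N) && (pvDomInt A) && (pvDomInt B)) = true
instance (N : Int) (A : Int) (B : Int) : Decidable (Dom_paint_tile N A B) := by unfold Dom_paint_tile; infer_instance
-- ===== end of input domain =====

-- B replaces A's per-cell nested mutation loops by two precomputed parity template rows
-- copied once per row; the return values are proved equal on all inputs.

-- ===== PORT A =====
-- tile[i][j] = v  for i, j as produced by range() (nonnegative, in range); exact there: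
def pvSetCell (t : List (List String)) (i j : Int) (v : String) : List (List String) :=
  match t[i.toNat]? with
  | some row => t.set i.toNat (row.set j.toNat v)
  | none => t

def paint_tile (N : Int) (A : Int) (B : Int) : List (List String) :=
  let tile := (PySem.List.pyRange 0 (A*N) 1).map (fun _ => (PySem.List.pyRange 0 (B*N) 1).map (fun _ => "."))
  (PySem.List.pyRange 0 (A*N) 1).foldl (fun t i =>
    (PySem.List.pyRange 0 (B*N) 1).foldl (fun t j =>
      if PySem.Int.mod i 2 == 0 && PySem.Int.mod j 2 == 0 then pvSetCell t i j "#"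
      else if PySem.Int.mod i 2 == 1 && PySem.Int.mod j 2 == 1 then pvSetCell t i j "#"
      else t) t) tile

-- ===== PORT B =====
-- (Python's per-row list(...) copy is the identity on immutable Lean lists)
def paint_tile_alt (N : Int) (A : Int) (B : Int) : List (List String) :=
  if A * N ≤ 0 then []
  else
  let evenRow := (PySem.List.pyRange 0 (B*N) 1).map (fun j => if PySem.Int.mod j 2 == 0 then "#" else ".")
  let oddRow := (PySem.List.pyRange 0 (B*N) 1).map (fun j => if PySem.Int.mod j 2 == 1 then "#" else ".")
  (PySem.List.pyRange 0 (A*N) 1).map (fun i => if PySem.Int.mod i 2 == 0 then evenRow else oddRow)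

-- ===== PRECONDITION & SPEC =====
def Spec_paint_tile (N : Int) (A : Int) (B : Int) (out : List (List String)) : Prop := out = paint_tile_alt N A B
instance (N : Int) (A : Int) (B : Int) (out : List (List String)) : Decidable (Spec_paint_tile N A B out) := by unfold Spec_paint_tile; infer_instance

-- ===== CLAIM (what is proved, stated in full; the proofs are below) =====
def Claim_equal_paint_tile : Prop := ∀ (N : Int) (A : Int) (B : Int), Dom_paint_tile N A B → Spec_paint_tile N A B (paint_tile N A B)

-- ===== LEMMAS AND PROOFS =====

-- replace entry k of t by F applied to it (no-op when k is out of range)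
def pvUpdateAt {α : Type} (t : List α) (k : Nat) (F : α → α) : List α :=
  match t[k]? with
  | some x => t.set k (F x)
  | none => t

-- pyRange 0 L 1 is the casted Nat range
theorem pv_range_cast (L : Int) :
    PySem.List.pyRange 0 L 1 = (List.range L.toNat).map (fun (k : Nat) => (k : Int)) := by
  rw [PySem.List.pyRange_one]
  simp only [sub_zero]
  apply List.map_congr_left
  intro a _
  omega

-- collapse A's two-branch assignment into one condition
theorem pv_if_or {α : Type} (a b : Bool) (x y : α) :
    (if a then x else if b then x else y) = if a || b then x else y := by
  cases a <;> cases b <;> simp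

-- a fold over range m that conditionally sets position k to v, computed pointwise
theorem pv_foldl_set_range {α : Type} (p : Nat → Bool) (v : α) :
    ∀ (m : Nat) (t : List α),
      (List.range m).foldl (fun r k => if p k then r.set k v else r) t
        = t.mapIdx (fun k x => if k < m ∧ p k then v else x) := by
  intro m
  induction m with
  | zero =>
    intro t
    apply List.ext_getElem <;> simp
  | succ m ih =>
    intro t
    rw [List.range_succ, List.foldl_append, ih]
    simp only [List.foldl_cons, List.foldl_nil]
    apply List.ext_getElem
    · by_cases hp : p m <;> simp [hp]
    · intro k hk1 hk2
      by_cases hp : p m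
      · simp only [hp, if_true]
        rcases eq_or_ne k m with h | h
        · subst h
          rw [List.getElem_set_self, List.getElem_mapIdx]
          simp [hp]
        · rw [List.getElem_set_ne (Ne.symm h), List.getElem_mapIdx, List.getElem_mapIdx]
          congr 1
          simp only [eq_iff_iff]
          constructor <;> rintro ⟨h1, h2⟩ <;> exact ⟨by omega, h2⟩
      · simp only [hp, if_false, Bool.false_eq_true]
        rw [List.getElem_mapIdx, List.getElem_mapIdx]
        congr 1
        simp only [eq_iff_iff]
        constructor <;> rintro ⟨h1, h2⟩
        · exact ⟨by omega, h2⟩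
        · refine ⟨?_, h2⟩
          rcases Nat.lt_succ_iff_lt_or_eq.mp h1 with h | h
          · exact h
          · exfalso; subst h; exact hp h2

-- a fold over range m that replaces entry k by F k (when present), computed pointwise
theorem pv_foldl_update_range {α : Type} (F : Nat → α → α) :
    ∀ (m : Nat) (t : List α),
      (List.range m).foldl (fun t k => pvUpdateAt t k (F k)) t
        = t.mapIdx (fun k x => if k < m then F k x else x) := by
  intro m
  induction m with
  | zero =>
    intro t
    apply List.ext_getElem <;> simp
  | succ m ih =>
    intro t
    rw [List.range_succ, List.foldl_append, ih]
    simp only [List.foldl_cons, List.foldl_nil, pvUpdateAt]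
    by_cases hm : m < t.length
    · have hget : (t.mapIdx fun k x => if k < m then F k x else x)[m]? =
          some (if m < m then F m t[m] else t[m]) := by
        simp [hm]
      rw [hget]
      simp only [Nat.lt_irrefl, if_false]
      apply List.ext_getElem
      · simp
      · intro k hk1 hk2
        rcases eq_or_ne k m with h | h
        · subst h
          rw [List.getElem_set_self, List.getElem_mapIdx]
          simp
        · have hkt : k < t.length := by simpa using hk2
          rw [List.getElem_set_ne (Ne.symm h), List.getElem_mapIdx, List.getElem_mapIdx]
          split_ifs <;> first | rfl | omega
    · have hget : (t.mapIdx fun k x => if k < m then F k x else x)[m]? = none := by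
        simp; omega
      rw [hget]
      show (t.mapIdx fun k x => if k < m then F k x else x)
          = t.mapIdx fun k x => if k < m + 1 then F k x else x
      apply List.ext_getElem
      · simp
      · intro k hk1 hk2
        have hkt : k < t.length := by simpa using hk2
        rw [List.getElem_mapIdx, List.getElem_mapIdx]
        split_ifs <;> first | rfl | omega

-- the inner j-loop of A, all steps sharing row index i, acts on row i alone
theorem pv_inner_as_row (c : Int → Bool) (i : Int) :
    ∀ (js : List Int) (t : List (List String)),
      js.foldl (fun t j => if c j then pvSetCell t i j "#" else t) t
        = pvUpdateAt t i.toNat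
            (fun row => js.foldl (fun r j => if c j then r.set j.toNat "#" else r) row) := by
  intro js
  induction js with
  | nil =>
    intro t
    unfold pvUpdateAt
    cases hrow : t[i.toNat]? with
    | none => simp
    | some row =>
      have hlen : i.toNat < t.length := (List.getElem?_eq_some_iff.mp hrow).1
      have hval : t[i.toNat] = row := (List.getElem?_eq_some_iff.mp hrow).2
      simp only [List.foldl_nil]
      rw [← hval, List.set_getElem_self hlen]
  | cons j rest ih =>
    intro t
    unfold pvUpdateAt
    cases hrow : t[i.toNat]? with
    | none =>
      simp only [List.foldl_cons]
      by_cases hc : c j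
      · simp only [hc, if_true]
        have hid : pvSetCell t i j "#" = t := by
          unfold pvSetCell; rw [hrow]
        rw [hid, ih]
        unfold pvUpdateAt
        rw [hrow]
      · simp only [hc, if_false, Bool.false_eq_true]
        rw [ih]
        unfold pvUpdateAt
        rw [hrow]
    | some row =>
      have hlen : i.toNat < t.length := (List.getElem?_eq_some_iff.mp hrow).1
      simp only [List.foldl_cons]
      by_cases hc : c j
      · simp only [hc, if_true]
        have hstep : pvSetCell t i j "#" = t.set i.toNat (row.set j.toNat "#") := by
          unfold pvSetCell; rw [hrow]
        rw [hstep, ih]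
        unfold pvUpdateAt
        have hget2 : (t.set i.toNat (row.set j.toNat "#"))[i.toNat]? = some (row.set j.toNat "#") := by
          simp [hlen]
        rw [hget2]
        simp [List.set_set]
      · simp only [hc, if_false, Bool.false_eq_true]
        rw [ih]
        unfold pvUpdateAt
        rw [hrow]

-- Python's  n % 2  for a casted Nat, as a Bool comparison
theorem pv_mod2_beq0 (k : Nat) : (PySem.Int.mod (k:Int) 2 == (0:Int)) = (k % 2 == 0) := by
  have h : PySem.Int.mod (k:Int) 2 = ((k % 2 : Nat) : Int) := by
    exact_mod_cast PySem.Int.mod_natCast k 2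
  rw [h]
  rcases Nat.mod_two_eq_zero_or_one k with e | e <;> simp [e]

theorem pv_mod2_beq1 (k : Nat) : (PySem.Int.mod (k:Int) 2 == (1:Int)) = (k % 2 == 1) := by
  have h : PySem.Int.mod (k:Int) 2 = ((k % 2 : Nat) : Int) := by
    exact_mod_cast PySem.Int.mod_natCast k 2
  rw [h]
  rcases Nat.mod_two_eq_zero_or_one k with e | e <;> simp [e]

-- main equality of the two ports
theorem pv_main (N A B : Int) : paint_tile N A B = paint_tile_alt N A B := by
  unfold paint_tile paint_tile_alt
  by_cases hA : A * N ≤ 0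
  · simp [PySem.List.pyRange_one_eq_nil hA, hA]
  rw [if_neg hA]
  rw [pv_range_cast, pv_range_cast]
  have houter : ∀ (i : Int) (t : List (List String)),
      ((List.range (B*N).toNat).map (fun (k : Nat) => (k : Int))).foldl (fun t j =>
        if PySem.Int.mod i 2 == 0 && PySem.Int.mod j 2 == 0 then pvSetCell t i j "#"
        else if PySem.Int.mod i 2 == 1 && PySem.Int.mod j 2 == 1 then pvSetCell t i j "#"
        else t) t
      = pvUpdateAt t i.toNat (fun row => row.mapIdx (fun k x =>
            if k < (B*N).toNat ∧ ((PySem.Int.mod i 2 == 0 && PySem.Int.mod (k:Int) 2 == 0)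
              || (PySem.Int.mod i 2 == 1 && PySem.Int.mod (k:Int) 2 == 1)) then "#" else x)) := by
    intro i t
    simp only [pv_if_or]
    rw [pv_inner_as_row (fun j => (PySem.Int.mod i 2 == 0 && PySem.Int.mod j 2 == 0)
        || (PySem.Int.mod i 2 == 1 && PySem.Int.mod j 2 == 1)) i]
    have hfold : ∀ (row : List String),
        ((List.range (B*N).toNat).map (fun (k : Nat) => (k : Int))).foldl (fun r j =>
          if (PySem.Int.mod i 2 == 0 && PySem.Int.mod j 2 == 0)
            || (PySem.Int.mod i 2 == 1 && PySem.Int.mod j 2 == 1) then r.set j.toNat "#" else r) row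
        = row.mapIdx (fun k x =>
            if k < (B*N).toNat ∧ ((PySem.Int.mod i 2 == 0 && PySem.Int.mod (k:Int) 2 == 0)
              || (PySem.Int.mod i 2 == 1 && PySem.Int.mod (k:Int) 2 == 1)) then "#" else x) := by
      intro row
      rw [List.foldl_map]
      simp only [Int.toNat_natCast]
      rw [pv_foldl_set_range]
    simp only [hfold]
  rw [List.foldl_map]
  simp only [houter, Int.toNat_natCast]
  simp only [pv_foldl_update_range (fun (k : Nat) (row : List String) =>
      List.mapIdx (fun (l : Nat) (x : String) =>
        if l < (B*N).toNat ∧ ((PySem.Int.mod (k:Int) 2 == 0 && PySem.Int.mod (l:Int) 2 == 0)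
          || (PySem.Int.mod (k:Int) 2 == 1 && PySem.Int.mod (l:Int) 2 == 1)) then "#" else x) row) ((A*N).toNat)]
  apply List.ext_getElem
  · simp
  · intro k hk1 hk2
    have hk : k < (A*N).toNat := by simpa using hk1
    simp only [List.getElem_mapIdx, List.getElem_map, List.getElem_range, hk, if_true,
      pv_mod2_beq0, pv_mod2_beq1]
    rcases Nat.mod_two_eq_zero_or_one k with hke | hke <;>
      · simp only [hke]
        apply List.ext_getElem
        · simp
        · intro l hl1 hl2
          have hl : l < (B*N).toNat := by simpa using hl1
          simp only [List.getElem_mapIdx, List.getElem_map]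
          rcases Nat.mod_two_eq_zero_or_one l with hle | hle <;> simp [hle, hl] <;> omega

-- ===== VERDICT (by name: the statement is the Claim_ definition above) =====
theorem paint_tile_spec : Claim_equal_paint_tile := by
  intro N A B _
  unfold Spec_paint_tile
  exact pv_main N A B
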